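-- pv_equiv track=rewrite | github.com/euribates/agent_madrox | models.py | loop
-- ===== SOURCE A (Python) =====
-- def loop(sequence, start=0):
--     sequence = list(sequence)
--     if sequence:
--         last_pos = len(sequence) - 1
--         for index, value in enumerate(sequence):
--             is_first = bool(index == 0)
--             is_last = bool(index == last_pos)
--             yield (index+start, is_first, is_last, value)
-- ===== SOURCE B (Python) =====
-- def loop(sequence, start=0):
--     it = iter(sequence)
--     try:
--         prev = next(it)
--     except StopIteration:
--         return
--     index = start
--     is_first = True
--     for value in it:
--         yield (index, is_first, False, prev)
--         prev = value
--         index += 1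
--         is_first = False
--     yield (index, is_first, True, prev)
-- ===== Notes on version B (the rewrite author's own statement) =====
-- stated objective: idiomatic
-- what changed: Replaces the list() materialisation plus enumerate/last-index comparison with a lazy one-step-lookahead generator that buffers the previous element and marks it last only after the iterator is exhausted.
import Mathlib
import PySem

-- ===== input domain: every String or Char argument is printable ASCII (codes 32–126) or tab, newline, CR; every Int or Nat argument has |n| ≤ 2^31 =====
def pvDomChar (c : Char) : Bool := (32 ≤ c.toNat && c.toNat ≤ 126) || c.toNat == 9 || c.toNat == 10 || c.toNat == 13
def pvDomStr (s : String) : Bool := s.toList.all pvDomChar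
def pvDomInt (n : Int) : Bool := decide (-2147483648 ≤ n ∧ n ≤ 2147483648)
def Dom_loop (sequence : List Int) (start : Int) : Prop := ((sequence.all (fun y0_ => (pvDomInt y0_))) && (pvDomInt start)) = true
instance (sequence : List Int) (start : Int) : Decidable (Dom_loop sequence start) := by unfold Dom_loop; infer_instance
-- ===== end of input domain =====

-- B replaces A's list()+enumerate/last-index scan by a lazy one-step-lookahead generator (idiomatic, O(1) buffer).
-- ===== PORT A =====
-- A: materialise the sequence, compute last_pos, map over enumerate with index comparisons.
def loop (sequence : List Int) (start : Int) : List (Int × Bool × Bool × Int) :=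
  if sequence = [] then []
  else
    let lastPos : Int := (sequence.length : Int) - 1
    (PySem.List.enumerate sequence).map
      (fun iv => (iv.1 + start, decide (iv.1 = 0), decide (iv.1 = lastPos), iv.2))

-- ===== PORT B =====
-- B: lazy one-step-lookahead — buffer prev; each step emits prev with is_last=False,
-- and after the loop the buffered element is emitted with is_last=True.
def loopAltGo (index : Int) (isFirst : Bool) (prev : Int) : List Int → List (Int × Bool × Bool × Int)
  | [] => [(index, isFirst, true, prev)]
  | value :: rest => (index, isFirst, false, prev) :: loopAltGo (index + 1) false value rest

def loop_alt (sequence : List Int) (start : Int) : List (Int × Bool × Bool × Int) :=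
  match sequence with
  | [] => []
  | prev :: rest => loopAltGo start true prev rest

-- ===== PRECONDITION & SPEC =====
def Spec_loop (sequence : List Int) (start : Int) (out : List (Int × Bool × Bool × Int)) : Prop := out = loop_alt sequence start
instance (sequence : List Int) (start : Int) (out : List (Int × Bool × Bool × Int)) : Decidable (Spec_loop sequence start out) := by unfold Spec_loop; infer_instance

-- ===== CLAIM (what is proved, stated in full; the proofs are below) =====
def Claim_equal_loop : Prop := ∀ (sequence : List Int) (start : Int), Dom_loop sequence start → Spec_loop sequence start (loop sequence start)

-- ===== LEMMAS AND PROOFS =====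
lemma loopAltGo_eq (rest : List Int) : ∀ (prev start s : Int) (f1 : Bool),
    loopAltGo start f1 prev rest =
      (PySem.List.enumerate (prev :: rest) s).map
        (fun iv => (iv.1 - s + start, f1 && decide (iv.1 = s), decide (iv.1 = s + (rest.length : Int)), iv.2)) := by
  induction rest with
  | nil =>
    intro prev start s f1
    simp [loopAltGo, PySem.List.enumerate_cons, PySem.List.enumerate_nil]
  | cons v rs ih =>
    intro prev start s f1
    rw [loopAltGo, PySem.List.enumerate_cons, List.map_cons]
    refine List.cons_eq_cons.mpr ⟨?_, ?_⟩
    · have h : s ≠ s + ((rs.length : Int) + 1) := by omega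
      simp [h]
    · rw [ih v (start + 1) (s + 1) false]
      apply List.map_congr_left
      intro iv hiv
      obtain ⟨k, hk, hiv⟩ := (PySem.List.mem_enumerate_iff _ _ _).mp hiv
      subst hiv
      have h1 : ¬ ((s + 1 + (k : Int)) = s) := by omega
      simp only [Bool.false_and, h1, List.length_cons]
      refine Prod.ext (by ring) (Prod.ext (by simp) (Prod.ext ?_ rfl))
      push_cast
      rw [decide_eq_decide]
      omega

-- ===== VERDICT (by name: the statement is the Claim_ definition above) =====
theorem loop_spec : Claim_equal_loop := by
  intro sequence start _
  unfold Spec_loop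
  cases sequence with
  | nil => simp [loop, loop_alt]
  | cons prev rest =>
    show loop (prev :: rest) start = loopAltGo start true prev rest
    rw [loopAltGo_eq rest prev start 0 true]
    unfold loop
    rw [if_neg (List.cons_ne_nil prev rest)]
    apply List.map_congr_left
    intro iv _
    simp only [Bool.true_and, List.length_cons, zero_add, sub_zero]
    refine Prod.ext rfl (Prod.ext rfl (Prod.ext ?_ rfl))
    rw [decide_eq_decide]
    push_cast
    omega
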